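-- pv_equiv track=rewrite | github.com/syedaliabbas1/Tableau | test6.py | find_connective_index
-- ===== SOURCE A (Python) =====
-- def find_connective_index(fmla):
--     depth = 0
--     for i in range(len(fmla)):
--         if fmla[i] == '(':
--             depth += 1
--         elif fmla[i] == ')':
--             depth -= 1
--         elif depth == 1 and i+1 < len(fmla) and fmla[i:i+2] in ['/\\', '\\/', '=>']:
--             return i
--     return None
-- ===== SOURCE B (Python) =====
-- def find_connective_index(fmla):
--     # First pass: prefix table of parenthesis depths (depth just before char i).
--     depths = []
--     d = 0
--     for ch in fmla:
--         depths.append(d)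
--         if ch == '(':
--             d += 1
--         elif ch == ')':
--             d -= 1
--     # Second pass: first index at depth 1 starting a binary connective token.
--     for i, d0 in enumerate(depths):
--         if d0 == 1 and fmla[i:i+2] in ('/\\', '\\/', '=>'):
--             return i
--     return None
-- ===== Notes on version B (the rewrite author's own statement) =====
-- stated objective: alternative
-- what changed: Replaces the fused single loop (depth tracking interleaved with connective test and early return) by two separate passes: first a prefix table of parenthesis depths, then a scan for the first index with depth 1 that starts a connective token.
import Mathlib
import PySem

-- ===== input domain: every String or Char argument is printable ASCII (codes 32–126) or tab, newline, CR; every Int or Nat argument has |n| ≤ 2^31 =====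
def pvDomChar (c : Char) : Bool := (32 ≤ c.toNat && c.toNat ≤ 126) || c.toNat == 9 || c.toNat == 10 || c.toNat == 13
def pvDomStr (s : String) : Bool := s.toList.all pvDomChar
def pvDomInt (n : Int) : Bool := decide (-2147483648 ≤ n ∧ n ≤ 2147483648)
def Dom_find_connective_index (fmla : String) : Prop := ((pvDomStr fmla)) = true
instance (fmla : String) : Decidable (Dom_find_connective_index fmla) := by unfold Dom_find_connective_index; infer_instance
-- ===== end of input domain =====

-- B replaces A's fused single loop by two passes (depth prefix table, then token search); alternative decomposition, same cost.


-- ===== PORT A =====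
-- A's loop: depth updated on '(' / ')', otherwise test depth == 1 and fmla[i:i+2] a token
-- ('i+1 < len(fmla)' is 'rest ≠ []', i.e. the next character exists).
def fciGoA (depth : Int) (i : Int) : List Char → Option Int
  | [] => none
  | c :: rest =>
    if c = '(' then fciGoA (depth + 1) (i + 1) rest
    else if c = ')' then fciGoA (depth - 1) (i + 1) rest
    else if depth == 1 && (match rest with
          | c2 :: _ => (c == '/' && c2 == '\\') || (c == '\\' && c2 == '/') || (c == '=' && c2 == '>')
          | [] => false) then some i
    else fciGoA depth (i + 1) rest

def find_connective_index (fmla : String) : Option Int := fciGoA 0 0 fmla.toList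

-- ===== PORT B =====
-- First pass of B: depths[i] = parenthesis depth just before character i.
def fciDepths (d : Int) : List Char → List Int
  | [] => []
  | c :: rest => d :: fciDepths (if c = '(' then d + 1 else if c = ')' then d - 1 else d) rest

-- fmla[i:i+2] as a token test on the 2-element prefix of the remaining characters.
def fciIsTok (l : List Char) : Bool :=
  l == ['/', '\\'] || l == ['\\', '/'] || l == ['=', '>']

-- Second pass of B: enumerate the depth table, testing the slice at each index.
def fciSearch (i : Int) : List Int → List Char → Option Int
  | [], _ => none
  | d :: ds, cs =>
    if d == 1 && fciIsTok (cs.take 2) then some i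
    else fciSearch (i + 1) ds cs.tail

def find_connective_index_alt (fmla : String) : Option Int :=
  fciSearch 0 (fciDepths 0 fmla.toList) fmla.toList

-- ===== PRECONDITION & SPEC =====
def Spec_find_connective_index (fmla : String) (out : Option Int) : Prop := out = find_connective_index_alt fmla
instance (fmla : String) (out : Option Int) : Decidable (Spec_find_connective_index fmla out) := by unfold Spec_find_connective_index; infer_instance

-- ===== CLAIM (what is proved, stated in full; the proofs are below) =====
def Claim_equal_find_connective_index : Prop := ∀ (fmla : String), Dom_find_connective_index fmla → Spec_find_connective_index fmla (find_connective_index fmla)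

-- ===== LEMMAS AND PROOFS =====
theorem fciGoA_eq_search (cs : List Char) : ∀ (d i : Int),
    fciGoA d i cs = fciSearch i (fciDepths d cs) cs := by
  induction cs with
  | nil => intro d i; rfl
  | cons c rest ih =>
    intro d i
    by_cases h1 : c = '('
    · subst h1
      simp [fciGoA, fciDepths, fciSearch, fciIsTok, ih]
    · by_cases h2 : c = ')'
      · subst h2
        simp [fciGoA, fciDepths, fciSearch, fciIsTok, ih]
      · simp [fciGoA, fciDepths, fciSearch, fciIsTok, h1, h2, ih]
        cases rest with
        | nil => simp
        | cons c2 r2 => simp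

-- ===== VERDICT (by name: the statement is the Claim_ definition above) =====
theorem find_connective_index_spec : Claim_equal_find_connective_index := by
  intro fmla _
  unfold Spec_find_connective_index find_connective_index find_connective_index_alt
  exact fciGoA_eq_search _ 0 0
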